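-- pv_equiv track=rewrite | github.com/yaroslaff/pinkhash | pinkhash/languages/nato.py | convert
-- ===== SOURCE A (Python) =====
-- nato_alphabet = [
--     'Alpha',
--     'Bravo',
--     'Charlie',
--     'Delta',
--     'Echo',
--     'Foxtrot',
--     'Golf',
--     'Hotel',
--     'India',
--     'Juliett',
--     'Kilo',
--     'Lima',
--     'Mike',
--     'November',
--     'Oscar',
--     'Papa',
--     'Quebec',
--     'Romeo',
--     'Sierra',
--     'Tango',
--     'Uniform',
--     'Victor',
--     'Whiskey',
--     'Xray',
--     'Yankee',
--     'Zulu'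
-- ]
--
-- def convert(number: int, option: str=None):
--     words = list()
--
--     sz = len(nato_alphabet)
--
--     while True:
--         remainder = number % sz
--         words.append(nato_alphabet[remainder])
--         number = number // sz
--
--         if number == 0:
--             break
--
--     return words
-- ===== SOURCE B (Python) =====
-- nato_alphabet = [
--     'Alpha', 'Bravo', 'Charlie', 'Delta', 'Echo', 'Foxtrot', 'Golf',
--     'Hotel', 'India', 'Juliett', 'Kilo', 'Lima', 'Mike', 'November',
--     'Oscar', 'Papa', 'Quebec', 'Romeo', 'Sierra', 'Tango', 'Uniform',
--     'Victor', 'Whiskey', 'Xray', 'Yankee', 'Zulu'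
-- ]
--
-- def convert(number: int, option: str=None):
--     # stage 1: count the base-26 digits of `number`
--     k, p = 1, 26
--     while p <= number:
--         k += 1
--         p *= 26
--     # stage 2: extract each digit positionally by a power of 26
--     return [nato_alphabet[(number // 26 ** i) % 26] for i in range(k)]
-- ===== Notes on version B (the rewrite author's own statement) =====
-- stated objective: alternative
-- what changed: Replaces the running-quotient append loop with two stages: first count the base-26 digits by comparing powers of 26, then extract each digit positionally with (number // 26**i) % 26 in a comprehension; Pre_ excludes negative numbers, on which A's while loop never terminates.
import Mathlib
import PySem

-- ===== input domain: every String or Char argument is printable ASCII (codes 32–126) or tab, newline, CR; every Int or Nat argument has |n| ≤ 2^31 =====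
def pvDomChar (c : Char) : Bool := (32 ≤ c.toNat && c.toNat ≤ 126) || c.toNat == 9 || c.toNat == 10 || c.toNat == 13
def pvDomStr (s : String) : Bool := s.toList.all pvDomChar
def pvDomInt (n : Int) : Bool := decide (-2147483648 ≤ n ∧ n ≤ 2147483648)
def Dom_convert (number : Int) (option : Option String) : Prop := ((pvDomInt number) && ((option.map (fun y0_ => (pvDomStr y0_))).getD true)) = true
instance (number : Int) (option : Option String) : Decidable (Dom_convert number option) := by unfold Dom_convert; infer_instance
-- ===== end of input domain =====

-- B replaces A's running-quotient append loop by two stages: count the base-26 digits,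
-- then extract each digit positionally with (number // 26^i) % 26. No speed claim.

def natoAlphabet : List String :=
  ["Alpha", "Bravo", "Charlie", "Delta", "Echo", "Foxtrot", "Golf",
   "Hotel", "India", "Juliett", "Kilo", "Lima", "Mike", "November",
   "Oscar", "Papa", "Quebec", "Romeo", "Sierra", "Tango", "Uniform",
   "Victor", "Whiskey", "Xray", "Yankee", "Zulu"]

-- ===== PORT A =====
-- A's 'while True' loop; fuel (number.toNat + 1) only makes the recursion total —
-- it is ample for every number ≥ 0 (the remainder is always in [0,26), so getD is exact).
def convertLoop (fuel : Nat) (words : List String) (number : Int) : List String :=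
  match fuel with
  | 0 => words
  | fuel + 1 =>
    let remainder := PySem.Int.mod number 26
    let words := words ++ [natoAlphabet.getD remainder.toNat ""]
    let number := PySem.Int.floordiv number 26
    if number == 0 then words else convertLoop fuel words number

def convert (number : Int) (option : Option String) : List String :=
  convertLoop (number.toNat + 1) [] number

-- ===== PORT B =====
-- stage 1 of Source B: the 'while p <= number' digit-counting loop (fuel makes it total;
-- ample, since p multiplies by 26 each step).
def countDigits (fuel : Nat) (k : Nat) (p : Int) (number : Int) : Nat :=
  match fuel with
  | 0 => k
  | fuel + 1 =>
    if p ≤ number then countDigits fuel (k + 1) (p * 26) number else k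

-- stage 2 of Source B: the comprehension over range(k).
def convert_alt (number : Int) (option : Option String) : List String :=
  let k := countDigits (number.toNat + 1) 1 26 number
  (List.range k).map (fun i =>
    natoAlphabet.getD (PySem.Int.mod (PySem.Int.floordiv number ((26 : Int) ^ i)) 26).toNat "")

-- ===== PRECONDITION & SPEC =====
-- Pre_ excludes negative numbers: there A's 'while True' loop never terminates
-- (number // 26 stays negative), so A returns no value at all on them.
def Pre_convert (number : Int) (option : Option String) : Prop := 0 ≤ number
instance (number : Int) (option : Option String) : Decidable (Pre_convert number option) := by unfold Pre_convert; infer_instance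
def pvWitness_convert : Int × Option String := (677, none)
def Spec_convert (number : Int) (option : Option String) (out : List String) : Prop := out = convert_alt number option
instance (number : Int) (option : Option String) (out : List String) : Decidable (Spec_convert number option out) := by unfold Spec_convert; infer_instance

-- ===== CLAIM =====
def Claim_equal_convert : Prop := ∀ (number : Int) (option : Option String), Dom_convert number option → Pre_convert number option → Spec_convert number option (convert number option)

-- ===== LEMMAS AND PROOFS =====

-- reference form: the base-26 digit words of n, least significant first
def rep (n : Nat) : List String :=
  natoAlphabet.getD (n % 26) "" :: (if h : n < 26 then [] else rep (n / 26))
decreasing_by exact Nat.div_lt_self (by omega) (by omega)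

-- digit count with g 0 = 0
def g (n : Nat) : Nat :=
  if h : n = 0 then 0 else g (n / 26) + 1
decreasing_by exact Nat.div_lt_self (by omega) (by omega)

theorem g_le (n : Nat) : g n ≤ n := by
  induction n using Nat.strong_induction_on with
  | _ n ih =>
    rw [g]
    split
    · omega
    · have h1 : n / 26 < n := Nat.div_lt_self (by omega) (by omega)
      have := ih (n / 26) h1
      omega

theorem g_succ (n : Nat) (h : n ≠ 0) : g n = g (n / 26) + 1 := by
  rw [g]; simp [h]

theorem rep_small (n : Nat) (h : n < 26) : rep n = [natoAlphabet.getD (n % 26) ""] := by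
  rw [rep]; simp [h]

theorem rep_big (n : Nat) (h : ¬ n < 26) :
    rep n = natoAlphabet.getD (n % 26) "" :: rep (n / 26) := by
  rw [rep]; simp [h]

theorem rep_length (n : Nat) : (rep n).length = g (n / 26) + 1 := by
  induction n using Nat.strong_induction_on with
  | _ n ih =>
    by_cases h : n < 26
    · have h0 : n / 26 = 0 := by omega
      simp [rep_small n h, h0, g]
    · have h1 : n / 26 < n := Nat.div_lt_self (by omega) (by omega)
      rw [rep_big n h, List.length_cons, ih (n / 26) h1,
          g_succ (n / 26) (by omega)]

-- A's loop equals the reference form, for nonnegative number and ample fuel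
theorem convertLoop_eq_rep :
    ∀ (fuel : Nat) (n : Int) (words : List String), 0 ≤ n → n.toNat < fuel →
      convertLoop fuel words n = words ++ rep n.toNat := by
  intro fuel
  induction fuel with
  | zero => intro n words _ h; omega
  | succ fuel ih =>
    intro n words hn hf
    have hmod : PySem.Int.mod n 26 = n % 26 := PySem.Int.mod_eq_emod_of_pos (by omega)
    have hdiv : PySem.Int.floordiv n 26 = n / 26 := PySem.Int.floordiv_eq_ediv_of_pos (by omega)
    have htn : (n % 26).toNat = n.toNat % 26 := by omega
    rw [convertLoop]
    simp only [hmod, hdiv, htn]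
    by_cases hz : n / 26 = 0
    · have hlt : n.toNat < 26 := by omega
      simp [hz, rep_small n.toNat hlt]
    · have hge : ¬ n.toNat < 26 := by omega
      have hq : (n / 26).toNat = n.toNat / 26 := by omega
      have hqlt : (n / 26).toNat < fuel := by
        have : n.toNat / 26 < n.toNat := Nat.div_lt_self (by omega) (by omega)
        omega
      rw [if_neg (by simpa using hz), ih (n / 26) _ (by omega) hqlt,
          rep_big n.toNat hge, hq]
      simp

-- stage 1 of B computes g (n / 26^k) + k (invariant p = 26^k)
theorem countDigits_eq :
    ∀ (fuel k : Nat) (n : Int), 0 ≤ n → g (n.toNat / 26 ^ k) < fuel →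
      countDigits fuel k ((26 : Int) ^ k) n = g (n.toNat / 26 ^ k) + k := by
  intro fuel
  induction fuel with
  | zero => intro k n _ h; omega
  | succ fuel ih =>
    intro k n hn hf
    rw [countDigits]
    have hpow : (26 : Int) ^ k = ((26 ^ k : Nat) : Int) := by push_cast; ring
    by_cases hle : (26 : Int) ^ k ≤ n
    · have hle' : 26 ^ k ≤ n.toNat := by
        have h2 : ((26 ^ k : Nat) : Int) ≤ n := by rw [← hpow]; exact hle
        omega
      have hne : n.toNat / 26 ^ k ≠ 0 := by
        have := Nat.div_pos hle' (by positivity)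
        omega
      have hg : g (n.toNat / 26 ^ k) = g (n.toNat / 26 ^ (k + 1)) + 1 := by
        rw [g_succ _ hne, Nat.div_div_eq_div_mul, ← Nat.pow_succ]
      have h26 : (26 : Int) ^ k * 26 = (26 : Int) ^ (k + 1) := by ring
      rw [if_pos hle, h26, ih (k + 1) n hn (by omega)]
      omega
    · have hlt : n.toNat < 26 ^ k := by
        have h2 : n < ((26 ^ k : Nat) : Int) := by rw [← hpow]; omega
        omega
      have h0 : n.toNat / 26 ^ k = 0 := Nat.div_eq_of_lt hlt
      rw [if_neg hle, h0, g]
      simp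

-- stage 2 of B equals the reference form when k = (rep n).length
theorem map_range_eq_rep (n : Nat) :
    ∀ (m : Int), 0 ≤ m → m.toNat = n →
      (List.range (rep n).length).map (fun i =>
        natoAlphabet.getD (PySem.Int.mod (PySem.Int.floordiv m ((26 : Int) ^ i)) 26).toNat "") = rep n := by
  induction n using Nat.strong_induction_on with
  | _ n ih =>
    intro m hm hmn
    have hd0 : PySem.Int.floordiv m ((26 : Int) ^ 0) = m := by
      rw [PySem.Int.floordiv_eq_ediv_of_pos (by norm_num)]; simp
    have hmod : PySem.Int.mod m 26 = m % 26 := PySem.Int.mod_eq_emod_of_pos (by omega)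
    by_cases h : n < 26
    · rw [rep_small n h]
      have hL1 : ([natoAlphabet.getD (n % 26) ""] : List String).length = 1 := rfl
      rw [hL1, List.range_one, List.map_cons, List.map_nil, hd0, hmod]
      congr 2
      omega
    · have h1 : n / 26 < n := Nat.div_lt_self (by omega) (by omega)
      rw [rep_big n h]
      simp only [List.length_cons]
      rw [List.range_succ_eq_map, List.map_cons, List.map_map]
      have hhead : natoAlphabet.getD (PySem.Int.mod (PySem.Int.floordiv m ((26 : Int) ^ 0)) 26).toNat ""
          = natoAlphabet.getD (n % 26) "" := by
        rw [hd0, hmod]; congr 2; omega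
      have hq : (m / 26).toNat = n / 26 := by omega
      have htail := ih (n / 26) h1 (m / 26) (by omega) hq
      have hfun : ∀ i : Nat,
          ((fun i => natoAlphabet.getD (PySem.Int.mod (PySem.Int.floordiv m ((26 : Int) ^ i)) 26).toNat "") ∘
            (fun i => i + 1)) i
          = (fun i => natoAlphabet.getD (PySem.Int.mod (PySem.Int.floordiv (m / 26) ((26 : Int) ^ i)) 26).toNat "") i := by
        intro i
        simp only [Function.comp]
        congr 3
        rw [PySem.Int.floordiv_eq_ediv_of_pos (by positivity),
            PySem.Int.floordiv_eq_ediv_of_pos (by positivity)]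
        rw [pow_succ, mul_comm, ← Int.ediv_ediv_of_nonneg (by norm_num : (0:Int) ≤ 26)]
      rw [hhead, List.map_congr_left (fun i _ => hfun i), htail]

-- ===== VERDICT =====
theorem convert_spec : Claim_equal_convert := by
  intro number option _ hpre
  show convert number option = convert_alt number option
  have hn : 0 ≤ number := hpre
  have hA : convert number option = rep number.toNat := by
    simpa using convertLoop_eq_rep (number.toNat + 1) number [] hn (by omega)
  have hk : countDigits (number.toNat + 1) 1 26 number = (rep number.toNat).length := by
    have h26 : (26 : Int) = (26 : Int) ^ 1 := by ring
    have hfuel : g (number.toNat / 26 ^ 1) < number.toNat + 1 := by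
      have := g_le (number.toNat / 26)
      have : number.toNat / 26 ≤ number.toNat := Nat.div_le_self _ _
      have := g_le (number.toNat / 26)
      simp only [pow_one]
      omega
    rw [h26, countDigits_eq (number.toNat + 1) 1 number hn hfuel, rep_length]
    simp
  rw [hA, convert_alt]
  simp only [hk]
  exact (map_range_eq_rep number.toNat number hn rfl).symm
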